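-- pv_equiv track=rewrite | github.com/gaiusyu/Semlog | Semlog/Semlog.py | findtemplate
-- ===== SOURCE A (Python) =====
-- def findtemplate(count, event, sentence, c, lenset, len_t):
--     output = []
--     event1 = []
--     if count == 1:
--         event = event[0]
--         sentence.append(str(event[len(event) - 1]))
--         output = sentence
--     if count == 0:
--         lenset[len_t].append(sentence)  # 不符合同一类日志模板
--         sentence.append('Lenth' + str(len_t) + 'Event  ' + str(sentence))
--         output = sentence
--     if count > 1:
--         c = c[1:]
--         count = 0
--
--         for i in event:  # i表示该长度的日志语句有哪些。
--             k=c[0] + 1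
--             if "10.1.1.1" in sentence:
--                 k=k-1
--             if sentence[k] == i[k]:  # 如果词典中该长度的日志语句只有一类，那么直接进行匹配判断
--                 count += 1
--                 event1.append(i)
--         output, lenset = findtemplate(count, event1, sentence, c, lenset, len_t)
--     return output, lenset
-- ===== SOURCE B (Python) =====
-- def findtemplate(count, event, sentence, c, lenset, len_t):
--     # iterative version: walk an index j over c instead of recursing on c[1:];
--     # the "10.1.1.1" membership test is hoisted out of the loop (sentence never
--     # changes while filtering), and each level keeps the matches via one
--     # comprehension whose length is the new count.
--     adj = 0 if "10.1.1.1" in sentence else 1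
--     j = 1
--     while count > 1:
--         if event:
--             k = c[j] + adj
--             event = [i for i in event if sentence[k] == i[k]]
--         count = len(event)
--         j += 1
--     if count == 1:
--         ev = event[0]
--         sentence.append(str(ev[len(ev) - 1]))
--         output = sentence
--     elif count == 0:
--         lenset[len_t].append(sentence)
--         sentence.append('Lenth' + str(len_t) + 'Event  ' + str(sentence))
--         output = sentence
--     else:
--         output = []
--     return output, lenset
-- ===== Notes on version B (the rewrite author's own statement) =====
-- stated objective: alternative
-- what changed: Replaces A's linear recursion (which copies c[1:] and re-tests '10.1.1.1' in sentence for every event at every level) by a single while-loop driven by an index j into c, with the membership test hoisted out of the loop and each round's survivors computed by one comprehension whose length is the new count; the two base-case blocks run once after the loop.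
import Mathlib
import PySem

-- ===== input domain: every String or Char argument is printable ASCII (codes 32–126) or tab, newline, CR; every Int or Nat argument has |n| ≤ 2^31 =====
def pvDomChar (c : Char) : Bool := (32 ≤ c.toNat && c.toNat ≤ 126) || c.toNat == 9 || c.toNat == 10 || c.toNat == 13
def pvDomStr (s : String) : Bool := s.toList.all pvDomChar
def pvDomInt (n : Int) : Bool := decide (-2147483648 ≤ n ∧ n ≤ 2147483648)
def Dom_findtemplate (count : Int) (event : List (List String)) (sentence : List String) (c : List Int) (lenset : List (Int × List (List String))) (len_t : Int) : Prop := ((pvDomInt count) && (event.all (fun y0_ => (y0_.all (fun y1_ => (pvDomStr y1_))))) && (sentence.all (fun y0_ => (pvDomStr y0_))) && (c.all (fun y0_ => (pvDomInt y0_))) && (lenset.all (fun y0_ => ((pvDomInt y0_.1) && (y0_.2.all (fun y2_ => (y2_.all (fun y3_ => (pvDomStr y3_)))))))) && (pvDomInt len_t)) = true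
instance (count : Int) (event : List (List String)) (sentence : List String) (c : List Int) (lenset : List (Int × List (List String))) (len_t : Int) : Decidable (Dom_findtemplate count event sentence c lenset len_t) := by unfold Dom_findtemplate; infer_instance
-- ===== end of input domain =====

-- B rewrites A's linear recursion over c[1:] as one index-driven loop (hoisting the
-- "10.1.1.1" membership test out of the per-event work) followed by the base-case step.
-- Both Pythons mutate `sentence` and `lenset[len_t]` in place (the appended sentence
-- object is shared); the equivalence proved here is about the RETURN value, in which
-- that aliasing is reflected (the stored sentence carries the later-appended element).

-- ===== PORT A =====
-- shared helpers for Python's str()/repr() of a list of strings and for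
-- `lenset[len_t].append(...)` on the association list (dict keys are unique)
def pyEscChar (q : Char) (ch : Char) : List Char :=
  if ch = '\\' then ['\\', '\\']
  else if ch = '\t' then ['\\', 't']
  else if ch = '\n' then ['\\', 'n']
  else if ch = '\r' then ['\\', 'r']
  else if ch = q then ['\\', q]
  else [ch]

def pyReprStr (s : String) : String :=
  let q : Char := if s.toList.contains '\'' && !(s.toList.contains '"') then '"' else '\''
  String.ofList (q :: s.toList.flatMap (pyEscChar q) ++ [q])

def pyStrList (l : List String) : String :=
  "[" ++ String.intercalate ", " (l.map pyReprStr) ++ "]"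

def appendAt (lenset : List (Int × List (List String))) (k : Int) (v : List String) :
    List (Int × List (List String)) :=
  lenset.map (fun p => if p.1 = k then (p.1, p.2 ++ [v]) else p)

-- literal transliteration of A: recursion, slicing c[1:] each round.
-- The recursion consumes one element of c per round, so fuel = c.length + 2 is never
-- exhausted on inputs satisfying Pre_; the fuel-0 fallback is a pure totalization guard.
def findtemplateGo (fuel : Nat) (count : Int) (event : List (List String)) (sentence : List String) (c : List Int) (lenset : List (Int × List (List String))) (len_t : Int) : List String × (List (Int × List (List String))) :=
  match fuel with
  | 0 => ([], lenset)
  | fuel + 1 =>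
    if count = 1 then
      let ev := event.headD []                      -- event = event[0]
      let s' := sentence ++ [PySem.List.pyGetD ev ((ev.length : Int) - 1) ""]  -- event[len(event)-1]
      (s', lenset)
    else if count = 0 then
      -- lenset[len_t].append(sentence); sentence.append('Lenth'+str(len_t)+'Event  '+str(sentence))
      -- the stored sentence is the SAME object, so it also carries the appended element
      let s' := sentence ++ ["Lenth" ++ PySem.Int.toStr len_t ++ "Event  " ++ pyStrList sentence]
      (s', appendAt lenset len_t s')
    else if 1 < count then
      let c2 := PySem.List.slice c (some 1) none    -- c = c[1:]
      let st := event.foldl (fun (st : Int × List (List String)) i =>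
          let k0 := PySem.List.pyGetD c2 0 0 + 1
          let k := if sentence.contains "10.1.1.1" then k0 - 1 else k0
          if PySem.List.pyGetD sentence k "" = PySem.List.pyGetD i k "" then
            (st.1 + 1, st.2 ++ [i])
          else st) ((0 : Int), ([] : List (List String)))
      findtemplateGo fuel st.1 st.2 sentence c2 lenset len_t
    else ([], lenset)

def findtemplate (count : Int) (event : List (List String)) (sentence : List String) (c : List Int) (lenset : List (Int × List (List String))) (len_t : Int) : List String × (List (Int × List (List String))) :=
  findtemplateGo (c.length + 2) count event sentence c lenset len_t

-- ===== PORT B =====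
def bAdj (sentence : List String) : Bool := sentence.contains "10.1.1.1"

-- the while-loop: j walks over c; each round keeps the matching events.
-- The loop runs at most c.length rounds before Python exits it or raises on c[j],
-- so fuel = c.length + 1 is never exhausted inside Pre_; fuel-0 is a totalization guard.
def bLoop (fuel : Nat) (count : Int) (event : List (List String)) (sentence : List String) (c : List Int) (j : Nat) : Int × List (List String) :=
  match fuel with
  | 0 => (count, event)
  | fuel + 1 =>
    if 1 < count then
      if event = [] then (0, event)
      else if j < c.length then
        let k := PySem.List.pyGetD c (j : Int) 0 + (if bAdj sentence then 0 else 1)   -- c[j], in range by the guard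
        let event' := event.filter (fun i => PySem.List.pyGetD sentence k "" = PySem.List.pyGetD i k "")
        bLoop fuel (event'.length : Int) event' sentence c (j + 1)
      else (count, event)                           -- Python raises IndexError on c[j] here
    else (count, event)

def findtemplate_alt (count : Int) (event : List (List String)) (sentence : List String) (c : List Int) (lenset : List (Int × List (List String))) (len_t : Int) : List String × (List (Int × List (List String))) :=
  let st := bLoop (c.length + 1) count event sentence c 1
  if st.1 = 1 then
    let ev := st.2.headD []
    (sentence ++ [PySem.List.pyGetD ev ((ev.length : Int) - 1) ""], lenset)
  else if st.1 = 0 then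
    let s' := sentence ++ ["Lenth" ++ PySem.Int.toStr len_t ++ "Event  " ++ pyStrList sentence]
    (s', appendAt lenset len_t s')
  else ([], lenset)

-- ===== PRECONDITION & SPEC =====
-- the position compared against key k of c: k+1, minus one when "10.1.1.1" is in sentence
def matchKeyAt (sentence : List String) (k : Int) : Int :=
  k + (if sentence.contains "10.1.1.1" then 0 else 1)

-- the events surviving one matching round at position K
def survStep (sentence : List String) (K : Int) (E : List (List String)) : List (List String) :=
  E.filter (fun i => PySem.List.pyGetD sentence K "" = PySem.List.pyGetD i K "")

-- okRun states, round by round along the key list, that every index A touches is in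
-- range and that len_t is a key of lenset when the count-0 block runs: it holds exactly
-- on the inputs where the Python A returns instead of raising (IndexError / KeyError).
def okBase (lenset : List (Int × List (List String))) (len_t : Int) (count : Int) (event : List (List String)) : Bool :=
  if count = 1 then decide (event ≠ [] ∧ event.headD [] ≠ [])
  else if count = 0 then (lenset.map Prod.fst).contains len_t
  else if 1 < count then
    if event = [] then (lenset.map Prod.fst).contains len_t
    else false                        -- the key list is too short: A raises IndexError on c[0]
  else true

def okRun (sentence : List String) (lenset : List (Int × List (List String))) (len_t : Int) : List Int → Int → List (List String) → Bool
  | _ :: k :: rest, count, event =>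
    if 1 < count ∧ event ≠ [] then
      decide (PySem.Raise.InRange sentence.length (matchKeyAt sentence k)) &&
      event.all (fun i => decide (PySem.Raise.InRange i.length (matchKeyAt sentence k))) &&
      okRun sentence lenset len_t (k :: rest) ((survStep sentence (matchKeyAt sentence k) event).length : Int)
        (survStep sentence (matchKeyAt sentence k) event)
    else okBase lenset len_t count event
  | _, count, event => okBase lenset len_t count event

-- Pre_ holds exactly where the Python A returns normally: it rules out the raising
-- inputs only (IndexError on event[0]/event[-1]/c[j]/sentence[k]/i[k], KeyError on lenset[len_t]).
def Pre_findtemplate (count : Int) (event : List (List String)) (sentence : List String) (c : List Int) (lenset : List (Int × List (List String))) (len_t : Int) : Prop :=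
  okRun sentence lenset len_t c count event = true
instance (count : Int) (event : List (List String)) (sentence : List String) (c : List Int) (lenset : List (Int × List (List String))) (len_t : Int) : Decidable (Pre_findtemplate count event sentence c lenset len_t) := by unfold Pre_findtemplate; infer_instance

def pvWitness_findtemplate : Int × List (List String) × List String × List Int × (List (Int × List (List String))) × Int :=
  (2, [["a", "b"], ["a", "c"]], ["a", "b"], [9, 0], [(0, [])], 0)

def Spec_findtemplate (count : Int) (event : List (List String)) (sentence : List String) (c : List Int) (lenset : List (Int × List (List String))) (len_t : Int) (out : List String × (List (Int × List (List String)))) : Prop := out = findtemplate_alt count event sentence c lenset len_t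
instance (count : Int) (event : List (List String)) (sentence : List String) (c : List Int) (lenset : List (Int × List (List String))) (len_t : Int) (out : List String × (List (Int × List (List String)))) : Decidable (Spec_findtemplate count event sentence c lenset len_t out) := by unfold Spec_findtemplate; infer_instance

-- ===== CLAIM (what is proved, stated in full; the proofs are below) =====
def Claim_equal_findtemplate : Prop := ∀ (count : Int) (event : List (List String)) (sentence : List String) (c : List Int) (lenset : List (Int × List (List String))) (len_t : Int), Dom_findtemplate count event sentence c lenset len_t → Pre_findtemplate count event sentence c lenset len_t → Spec_findtemplate count event sentence c lenset len_t (findtemplate count event sentence c lenset len_t)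

-- ===== LEMMAS AND PROOFS =====

-- the tail of findtemplate_alt after the loop, as a named function for the induction
def finalizeB (sentence : List String) (lenset : List (Int × List (List String))) (len_t : Int) (st : Int × List (List String)) : List String × (List (Int × List (List String))) :=
  if st.1 = 1 then
    let ev := st.2.headD []
    (sentence ++ [PySem.List.pyGetD ev ((ev.length : Int) - 1) ""], lenset)
  else if st.1 = 0 then
    let s' := sentence ++ ["Lenth" ++ PySem.Int.toStr len_t ++ "Event  " ++ pyStrList sentence]
    (s', appendAt lenset len_t s')
  else ([], lenset)

-- A's counting/collecting fold is (length of the filtered list, the filtered list)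
theorem foldl_if_filter {α : Type} (p : α → Prop) [DecidablePred p] (l : List α) (n : Int) (acc : List α) :
    l.foldl (fun (st : Int × List α) i => if p i then (st.1 + 1, st.2 ++ [i]) else st) (n, acc)
      = (n + ((l.filter (fun i => decide (p i))).length : Int), acc ++ l.filter (fun i => decide (p i))) := by
  induction l generalizing n acc with
  | nil => simp
  | cons x xs ih =>
    by_cases hx : p x
    · simp [hx, ih]
      omega
    · simp [hx, ih]

-- a non-looping state passes through B's loop unchanged, whatever the fuel
theorem bLoop_stop (fuel : Nat) (count : Int) (event : List (List String)) (sentence : List String) (c : List Int) (j : Nat) (h : ¬ 1 < count) : bLoop fuel count event sentence c j = (count, event) := by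
  cases fuel <;> simp [bLoop, h]

-- any state that does not loop (count ≤ 1, or no events left) finishes identically on both sides
theorem base_eq (sentence : List String) (lenset : List (Int × List (List String))) (len_t : Int) (c : List Int) (ks : List Int) (j : Nat) (count : Int) (event : List (List String)) (hj2 : j ≤ c.length + 1) (h : ¬ 1 < count ∨ event = []) :
    findtemplateGo (ks.length + 2) count event sentence ks lenset len_t
      = finalizeB sentence lenset len_t (bLoop (c.length + 2 - j) count event sentence c j) := by
  obtain ⟨f, hf⟩ : ∃ f, c.length + 2 - j = f + 1 := ⟨c.length + 1 - j, by omega⟩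
  rw [hf]
  by_cases hc1 : count = 1
  · subst hc1
    rw [show ks.length + 2 = (ks.length + 1) + 1 from rfl, findtemplateGo,
        bLoop_stop _ _ _ _ _ _ (by omega : ¬ (1:Int) < 1)]
    simp [finalizeB]
  · by_cases hc0 : count = 0
    · subst hc0
      rw [show ks.length + 2 = (ks.length + 1) + 1 from rfl, findtemplateGo,
          bLoop_stop _ _ _ _ _ _ (by omega : ¬ (1:Int) < 0)]
      simp [finalizeB]
    · by_cases hgt : 1 < count
      · -- then event = []: one empty filtering round on both sides, ending in the count-0 block
        rcases h with h | h
        · omega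
        · subst h
          rw [show ks.length + 2 = (ks.length + 1) + 1 from rfl, findtemplateGo]
          simp only [if_neg hc1, if_neg hc0, if_pos hgt, List.foldl_nil]
          rw [show ks.length + 1 = ks.length + 1 from rfl, findtemplateGo, bLoop]
          simp [hgt, finalizeB]
      · rw [show ks.length + 2 = (ks.length + 1) + 1 from rfl, findtemplateGo,
            bLoop_stop _ _ _ _ _ _ hgt]
        simp only [if_neg hc1, if_neg hc0, if_neg hgt]
        simp [finalizeB, hc1, hc0]

-- the joint induction: A's recursion on the suffix ks = c.drop (j-1) against B's loop at index j
theorem run_eq (sentence : List String) (lenset : List (Int × List (List String))) (len_t : Int) (c : List Int) :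
    ∀ (ks : List Int) (j : Nat) (count : Int) (event : List (List String)),
    1 ≤ j → j ≤ c.length + 1 → ks = c.drop (j - 1) →
    okRun sentence lenset len_t ks count event = true →
    findtemplateGo (ks.length + 2) count event sentence ks lenset len_t
      = finalizeB sentence lenset len_t (bLoop (c.length + 2 - j) count event sentence c j) := by
  intro ks
  induction ks with
  | nil =>
    intro j count event hj1 hj2 hdrop hok
    by_cases hb : ¬ 1 < count ∨ event = []
    · exact base_eq sentence lenset len_t c [] j count event hj2 hb
    · rw [not_or, not_not] at hb
      exfalso
      unfold okRun okBase at hok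
      simp [show count ≠ 1 by omega, show count ≠ 0 by omega, hb.1, hb.2] at hok
  | cons a ks' ih =>
    intro j count event hj1 hj2 hdrop hok
    by_cases hb : ¬ 1 < count ∨ event = []
    · exact base_eq sentence lenset len_t c (a :: ks') j count event hj2 hb
    · rw [not_or, not_not] at hb
      obtain ⟨hgt, hev⟩ := hb
      have hc1 : count ≠ 1 := by omega
      have hc0 : count ≠ 0 := by omega
      match ks', ih with
      | [], _ =>
        exfalso
        unfold okRun okBase at hok
        simp [hc1, hc0, hgt, hev] at hok
      | k :: rest, ih =>
        -- geometry: the suffix pins down j and c[j]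
        have hlen : (a :: k :: rest).length = c.length - (j - 1) := by
          rw [hdrop, List.length_drop]
        have hjlt : j < c.length := by simp at hlen; omega
        have hdrop' : c.drop j = k :: rest := by
          rw [show j = (j - 1) + 1 by omega, ← List.tail_drop, ← hdrop]
          rfl
        have hcj : c.getD j 0 = k := by
          have h0 : (c)[j]? = some k := by
            have h1 : (List.drop j c)[0]? = (c)[j + 0]? := List.getElem?_drop
            rw [hdrop'] at h1
            simpa using h1.symm
          simp [List.getD_eq_getElem?_getD, h0]
        -- the okRun hypothesis: positions in range and okRun for the surviving events
        unfold okRun at hok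
        rw [if_pos (⟨hgt, hev⟩ : 1 < count ∧ event ≠ [])] at hok
        rw [Bool.and_eq_true, Bool.and_eq_true] at hok
        have hokrec := hok.2
        -- A side: one unfolding, the fold is the filter
        rw [show (a :: k :: rest).length + 2 = ((k :: rest).length + 2) + 1 from rfl,
            findtemplateGo]
        rw [if_neg hc1, if_neg hc0, if_pos hgt, PySem.List.slice_from_one]
        simp only [List.tail_cons]
        have hkey : (fun (st : Int × List (List String)) i =>
              let k0 := PySem.List.pyGetD (k :: rest) 0 0 + 1
              let kk := if sentence.contains "10.1.1.1" then k0 - 1 else k0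
              if PySem.List.pyGetD sentence kk "" = PySem.List.pyGetD i kk "" then (st.1 + 1, st.2 ++ [i]) else st)
            = (fun (st : Int × List (List String)) i =>
              if PySem.List.pyGetD sentence (matchKeyAt sentence k) "" = PySem.List.pyGetD i (matchKeyAt sentence k) "" then (st.1 + 1, st.2 ++ [i]) else st) := by
          funext st i
          have : (if sentence.contains "10.1.1.1" then PySem.List.pyGetD (k :: rest) 0 0 + 1 - 1 else PySem.List.pyGetD (k :: rest) 0 0 + 1) = matchKeyAt sentence k := by
            rw [PySem.List.pyGetD_zero_cons]
            unfold matchKeyAt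
            split <;> ring
          simp only [← this]
        rw [hkey, foldl_if_filter
              (fun i => PySem.List.pyGetD sentence (matchKeyAt sentence k) "" = PySem.List.pyGetD i (matchKeyAt sentence k) "")]
        simp only [Int.zero_add, List.nil_append]
        -- B side: one loop round at index j
        obtain ⟨f, hf⟩ : ∃ f, c.length + 2 - j = f + 1 := ⟨c.length + 1 - j, by omega⟩
        rw [hf, bLoop, if_pos hgt, if_neg hev, if_pos hjlt]
        have hkB : PySem.List.pyGetD c ((j : Nat) : Int) 0 + (if bAdj sentence then (0:Int) else 1) = matchKeyAt sentence k := by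
          rw [PySem.List.pyGetD_natCast, hcj]
          unfold bAdj matchKeyAt
          rfl
        simp only [hkB]
        -- both recursions are now the same state one index further; apply the IH
        rw [show f = c.length + 2 - (j + 1) by omega]
        exact ih (j + 1) _ _ (by omega) (by omega) (by rw [Nat.add_sub_cancel, hdrop'])
          (by
            have := hokrec
            unfold survStep at this
            exact this)

-- ===== VERDICT (by name: the statement is the Claim_ definition above) =====
theorem findtemplate_spec : Claim_equal_findtemplate := by
  unfold Claim_equal_findtemplate
  intro count event sentence c lenset len_t _ hpre
  unfold Spec_findtemplate
  have h := run_eq sentence lenset len_t c c 1 count event (by omega) (by omega) (by simp) hpre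
  unfold findtemplate findtemplate_alt
  rw [h]
  simp [finalizeB]
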